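-- pv_equiv track=rewrite | github.com/dhhruv/Binary-Search-Solutions | String Sequence.py | solve
-- ===== SOURCE A (Python) =====
-- def solve(s0, s1, n):
--     if n == 0:
--         return s0
--     if n == 1:
--         return s1
--     ls = [s0, s1]
--     for i in range(2, n + 1):
--         if i % 2 == 0:
--             ls.append(ls[i - 1] + ls[i - 2])
--         else:
--             ls.append(ls[i - 2] + ls[i - 1])
--     return ls[-1]
-- ===== SOURCE B (Python) =====
-- def solve(s0, s1, n):
--     # Top-down: recurse on the index with a memo table instead of building the list bottom-up.
--     # Each memoized term is needed exactly once more (by term(k+2)), so it is popped when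
--     # consumed, keeping only a couple of terms alive instead of the whole sequence.
--     memo = {}
--
--     def term(k):
--         if k == 0:
--             return s0
--         if k <= 1:
--             return s1
--         if k in memo:
--             return memo.pop(k)
--         a = term(k - 1)
--         b = term(k - 2)
--         r = a + b if k % 2 == 0 else b + a
--         memo[k] = r
--         return r
--
--     return term(n)
-- ===== Notes on version B (the rewrite author's own statement) =====
-- stated objective: alternative
-- what changed: Replaces the bottom-up loop that appends every term to a list (indexed ls[i-1]/ls[i-2]) by top-down recursion on the index with a memo dictionary whose entries are popped when consumed, so only a couple of terms stay alive instead of the whole sequence; the n<=1 base case also covers negative n, matching A's ls[-1] fallthrough.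
import Mathlib
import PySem

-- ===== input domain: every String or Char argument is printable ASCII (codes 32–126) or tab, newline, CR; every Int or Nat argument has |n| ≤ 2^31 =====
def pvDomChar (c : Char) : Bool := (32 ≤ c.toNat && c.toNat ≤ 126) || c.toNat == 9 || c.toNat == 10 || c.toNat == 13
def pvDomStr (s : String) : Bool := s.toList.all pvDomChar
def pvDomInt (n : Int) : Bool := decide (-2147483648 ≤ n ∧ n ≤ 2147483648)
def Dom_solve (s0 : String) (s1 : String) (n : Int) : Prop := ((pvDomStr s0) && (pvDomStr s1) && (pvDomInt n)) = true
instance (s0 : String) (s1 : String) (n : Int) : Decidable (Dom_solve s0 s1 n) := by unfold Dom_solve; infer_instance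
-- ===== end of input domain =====

-- B replaces A's bottom-up list accumulation by top-down memoized recursion on the index; equal values proved below.
-- ===== PORT A =====
def solve (s0 : String) (s1 : String) (n : Int) : String :=
  if n == 0 then s0
  else if n == 1 then s1
  else
    let ls := (PySem.List.pyRange 2 (n + 1) 1).foldl (fun ls i =>
      if PySem.Int.mod i 2 == 0 then
        ls ++ [PySem.List.pyGetD ls (i - 1) "" ++ PySem.List.pyGetD ls (i - 2) ""]
      else
        ls ++ [PySem.List.pyGetD ls (i - 2) "" ++ PySem.List.pyGetD ls (i - 1) ""]) [s0, s1]
    -- the list is always nonempty, so ls[-1] never raises; pyGetD is exact here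
    PySem.List.pyGetD ls (-1) ""

-- ===== PORT B =====
-- term(k) of Source B: the memo dict is threaded explicitly (Python mutates the closure's dict);
-- 'if k in memo: return memo.pop(k)' is the pop? hit, 'none' is the not-in-memo fallthrough.
def solveAltTerm (s0 : String) (s1 : String) (k : Int) (memo : PySem.Dict Int String) :
    String × PySem.Dict Int String :=
  if k == 0 then (s0, memo)
  else if k ≤ 1 then (s1, memo)
  else
    match memo.pop? k with
    | some (v, memo') => (v, memo')
    | none =>
      let p1 := solveAltTerm s0 s1 (k - 1) memo
      let p2 := solveAltTerm s0 s1 (k - 2) p1.2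
      let r := if PySem.Int.mod k 2 == 0 then p1.1 ++ p2.1 else p2.1 ++ p1.1
      (r, p2.2.insert k r)
termination_by k.toNat
decreasing_by all_goals (simp_all; omega)

def solve_alt (s0 : String) (s1 : String) (n : Int) : String :=
  (solveAltTerm s0 s1 n PySem.Dict.empty).1

-- ===== PRECONDITION & SPEC =====
def Spec_solve (s0 : String) (s1 : String) (n : Int) (out : String) : Prop := out = solve_alt s0 s1 n
instance (s0 : String) (s1 : String) (n : Int) (out : String) : Decidable (Spec_solve s0 s1 n out) := by unfold Spec_solve; infer_instance

-- ===== CLAIM =====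
def Claim_equal_solve : Prop := ∀ (s0 : String) (s1 : String) (n : Int), Dom_solve s0 s1 n → Spec_solve s0 s1 n (solve s0 s1 n)

-- ===== LEMMAS AND PROOFS =====

-- The mathematical recurrence both programs compute, on Nat indices.
def fN (s0 : String) (s1 : String) : Nat → String
  | 0 => s0
  | 1 => s1
  | (k + 2) =>
    if (k + 2) % 2 == 0 then fN s0 s1 (k + 1) ++ fN s0 s1 k
    else fN s0 s1 k ++ fN s0 s1 (k + 1)

-- The intended value at an Int index (negatives fall to s1, as both programs do).
def gInt (s0 : String) (s1 : String) (k : Int) : String :=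
  if k = 0 then s0 else if k ≤ 1 then s1 else fN s0 s1 k.toNat

theorem gInt_nonneg (s0 s1 : String) (k : Int) (h : 0 ≤ k) :
    gInt s0 s1 k = fN s0 s1 k.toNat := by
  unfold gInt
  split_ifs with h0 h1
  · subst h0; rfl
  · have : k = 1 := by omega
    subst this; rfl
  · rfl

theorem mod2_eq (k : Int) (h : 0 ≤ k) :
    (PySem.Int.mod k 2 == 0) = (k.toNat % 2 == 0) := by
  have h1 : PySem.Int.mod k 2 = ((k.toNat % 2 : Nat) : Int) := by
    simp only [PySem.Int.mod, Int.fmod_eq_emod]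
    norm_num
    omega
  rw [h1]
  by_cases hp : k.toNat % 2 = 0
  · simp [hp]
  · simp [hp]
    omega

theorem get?_erase (d : PySem.Dict Int String) (k k' : Int) :
    (d.erase k).get? k' = if k' = k then none else d.get? k' := by
  obtain ⟨l⟩ := d
  simp only [PySem.Dict.erase, PySem.Dict.get?]
  induction l with
  | nil => simp
  | cons p t ih =>
    rw [List.filter_cons]
    by_cases hk : p.1 = k
    · rw [show (!(p.1 == k)) = false by simp [hk]]
      simp only [Bool.false_eq_true, if_false]
      rw [ih]
      by_cases hk' : k' = k
      · simp [hk']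
      · rw [if_neg hk', if_neg hk', List.find?_cons,
          show (p.1 == k') = false by simp [hk]; omega]
    · rw [show (!(p.1 == k)) = true by simp [hk]]
      simp only [if_true]
      rw [List.find?_cons]
      by_cases hk' : p.1 = k'
      · rw [show (p.1 == k') = true by simp [hk']]
        rw [if_neg (by omega : ¬ k' = k), List.find?_cons,
          show (p.1 == k') = true by simp [hk']]
      · rw [show (p.1 == k') = false by simp [hk']]
        rw [ih]
        by_cases hkk : k' = k
        · simp [hkk]
        · rw [if_neg hkk, if_neg hkk, List.find?_cons,
            show (p.1 == k') = false by simp [hk']]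

-- memo soundness: every stored entry is the recurrence's value at a key ≥ 2
def GoodMemo (s0 s1 : String) (memo : PySem.Dict Int String) : Prop :=
  ∀ (k : Int) (v : String), memo.get? k = some v → 2 ≤ k ∧ v = fN s0 s1 k.toNat

theorem term_correct (s0 s1 : String) : ∀ (m : Nat) (k : Int) (memo : PySem.Dict Int String),
    k.toNat ≤ m → GoodMemo s0 s1 memo →
    (solveAltTerm s0 s1 k memo).1 = gInt s0 s1 k ∧ GoodMemo s0 s1 (solveAltTerm s0 s1 k memo).2 := by
  intro m
  induction m with
  | zero =>
    intro k memo hk hg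
    have hk1 : k ≤ 0 := by omega
    rw [solveAltTerm]
    by_cases h0 : k = 0
    · simp [h0, gInt]; exact hg
    · rw [if_neg (by simpa using h0), if_pos (by omega)]
      simp [gInt, h0, show k ≤ 1 by omega]
      exact hg
  | succ m ih =>
    intro k memo hk hg
    rw [solveAltTerm]
    by_cases h0 : k = 0
    · simp [h0, gInt]; exact hg
    · rw [if_neg (by simpa using h0)]
      by_cases h1 : k ≤ 1
      · rw [if_pos h1]
        simp [gInt, h0, h1]
        exact hg
      · rw [if_neg h1]
        have hk2 : 2 ≤ k := by omega
        cases hget : memo.get? k with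
        | some v =>
          have hpop : memo.pop? k = some (v, memo.erase k) := by
            simp [PySem.Dict.pop?, hget]
          rw [hpop]
          constructor
          · have := (hg k v hget).2
            rw [this, gInt_nonneg s0 s1 k (by omega)]
          · intro k' v' h'
            rw [get?_erase] at h'
            by_cases hkk : k' = k
            · rw [if_pos hkk] at h'; exact absurd h' (by simp)
            · rw [if_neg hkk] at h'
              exact hg k' v' h'
        | none =>
          have hpop : memo.pop? k = none := by
            simp [PySem.Dict.pop?, hget]
          rw [hpop]
          simp only []
          have ih1 := ih (k - 1) memo (by omega) hg
          have ih2 := ih (k - 2) (solveAltTerm s0 s1 (k - 1) memo).2 (by omega) ih1.2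
          have hv1 : (solveAltTerm s0 s1 (k - 1) memo).1 = fN s0 s1 (k - 1).toNat := by
            rw [ih1.1, gInt_nonneg s0 s1 (k - 1) (by omega)]
          have hv2 : (solveAltTerm s0 s1 (k - 2) (solveAltTerm s0 s1 (k - 1) memo).2).1
              = fN s0 s1 (k - 2).toNat := by
            rw [ih2.1, gInt_nonneg s0 s1 (k - 2) (by omega)]
          have hkt : k.toNat = (k - 2).toNat + 2 := by omega
          have hk1t : (k - 1).toNat = (k - 2).toNat + 1 := by omega
          have hval : (if PySem.Int.mod k 2 == 0 then
                (solveAltTerm s0 s1 (k - 1) memo).1 ++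
                  (solveAltTerm s0 s1 (k - 2) (solveAltTerm s0 s1 (k - 1) memo).2).1
              else
                (solveAltTerm s0 s1 (k - 2) (solveAltTerm s0 s1 (k - 1) memo).2).1 ++
                  (solveAltTerm s0 s1 (k - 1) memo).1) = fN s0 s1 k.toNat := by
            rw [hv1, hv2, mod2_eq k (by omega), hkt, hk1t, fN]
          constructor
          · simpa [gInt_nonneg s0 s1 k (by omega)] using hval
          · intro k' v' hget
            rw [PySem.Dict.get?_insert] at hget
            by_cases hkk : k' = k
            · rw [if_pos hkk] at hget
              refine ⟨by omega, ?_⟩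
              rw [hkk]
              have hrv := Option.some.inj hget
              rw [← hrv]
              exact hval
            · rw [if_neg hkk] at hget
              exact ih2.2 k' v' hget

-- A's loop invariant: starting from the first i terms, the fold extends the list to all n+1 terms.
theorem loopA (s0 s1 : String) : ∀ (m : Nat) (i n : Int), 2 ≤ i → i ≤ n + 1 → m = (n + 1 - i).toNat →
    (PySem.List.pyRange i (n + 1) 1).foldl (fun ls j =>
      if PySem.Int.mod j 2 == 0 then
        ls ++ [PySem.List.pyGetD ls (j - 1) "" ++ PySem.List.pyGetD ls (j - 2) ""]
      else
        ls ++ [PySem.List.pyGetD ls (j - 2) "" ++ PySem.List.pyGetD ls (j - 1) ""])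
      ((List.range i.toNat).map (fN s0 s1))
    = (List.range (n + 1).toNat).map (fN s0 s1) := by
  intro m
  induction m with
  | zero =>
    intro i n h2 hle hm
    have : i = n + 1 := by omega
    subst this
    rw [PySem.List.pyRange_one_eq_nil (by omega)]
    simp
  | succ m ih =>
    intro i n h2 hle hm
    have hi : i < n + 1 := by omega
    rw [PySem.List.pyRange_one_cons hi]
    simp only [List.foldl_cons]
    have hlen : ((List.range i.toNat).map (fN s0 s1)).length = i.toNat := by simp
    have hg1 : PySem.List.pyGetD ((List.range i.toNat).map (fN s0 s1)) (i - 1) ""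
        = fN s0 s1 (i - 1).toNat := by
      rw [PySem.List.pyGetD_eq_getElem _ "" (by omega) (by rw [hlen]; omega)]
      simp
    have hg2 : PySem.List.pyGetD ((List.range i.toNat).map (fN s0 s1)) (i - 2) ""
        = fN s0 s1 (i - 2).toNat := by
      rw [PySem.List.pyGetD_eq_getElem _ "" (by omega) (by rw [hlen]; omega)]
      simp
    have hit : i.toNat = (i - 2).toNat + 2 := by omega
    have hi1t : (i - 1).toNat = (i - 2).toNat + 1 := by omega
    have hstep : (if PySem.Int.mod i 2 == 0 then
          ((List.range i.toNat).map (fN s0 s1)) ++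
            [PySem.List.pyGetD ((List.range i.toNat).map (fN s0 s1)) (i - 1) "" ++
              PySem.List.pyGetD ((List.range i.toNat).map (fN s0 s1)) (i - 2) ""]
        else
          ((List.range i.toNat).map (fN s0 s1)) ++
            [PySem.List.pyGetD ((List.range i.toNat).map (fN s0 s1)) (i - 2) "" ++
              PySem.List.pyGetD ((List.range i.toNat).map (fN s0 s1)) (i - 1) ""])
        = (List.range (i + 1).toNat).map (fN s0 s1) := by
      have : (i + 1).toNat = i.toNat + 1 := by omega
      rw [this, List.range_succ, List.map_append, hg1, hg2, mod2_eq i (by omega)]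
      have hfn : fN s0 s1 i.toNat =
          if i.toNat % 2 == 0 then fN s0 s1 (i - 1).toNat ++ fN s0 s1 (i - 2).toNat
          else fN s0 s1 (i - 2).toNat ++ fN s0 s1 (i - 1).toNat := by
        rw [hit, hi1t, fN]
      by_cases hp : (i.toNat % 2 == 0) = true
      · rw [if_pos hp]
        simp only [List.map_cons, List.map_nil]
        rw [hfn, if_pos hp]
      · rw [if_neg hp]
        simp only [List.map_cons, List.map_nil]
        rw [hfn, if_neg hp]
    rw [hstep]
    exact ih (i + 1) n (by omega) (by omega) (by omega)

-- ===== VERDICT =====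
theorem solve_spec : Claim_equal_solve := by
  intro s0 s1 n _
  unfold Spec_solve
  have hB : solve_alt s0 s1 n = gInt s0 s1 n := by
    unfold solve_alt
    exact (term_correct s0 s1 n.toNat n PySem.Dict.empty (le_refl _)
      (by intro k v h; simp [PySem.Dict.get?_empty] at h)).1
  rw [hB]
  unfold solve
  by_cases h0 : n = 0
  · simp [h0, gInt]
  · rw [if_neg (by simpa using h0)]
    by_cases h1 : n = 1
    · subst h1
      rw [if_pos (by decide)]
      simp [gInt]
    · rw [if_neg (by simpa using h1)]
      by_cases h2 : 2 ≤ n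
      · have hloop := loopA s0 s1 (n + 1 - 2).toNat 2 n (by omega) (by omega) rfl
        have h22 : [s0, s1] = (List.range (2:Int).toNat).map (fN s0 s1) := by
          simp [show (2:Int).toNat = 2 from rfl, List.range_succ, fN]
        rw [h22, hloop]
        have hlen : (((List.range (n + 1).toNat).map (fN s0 s1)).length) = (n + 1).toNat := by simp
        rw [PySem.List.pyGetD_neg_ofNat _ 1 "" (by omega) (by rw [hlen]; omega)]
        have hidx : ((List.range (n + 1).toNat).map (fN s0 s1)).length - 1 = n.toNat := by
          rw [hlen]; omega
        simp only [hidx]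
        rw [List.getElem_map, List.getElem_range]
        simp [gInt, h0, show ¬ n ≤ 1 by omega]
      · -- n < 0: the range is empty, ls = [s0, s1], ls[-1] = s1 = gInt n
        have hneg : n < 0 := by omega
        rw [PySem.List.pyRange_one_eq_nil (by omega)]
        simp only [List.foldl_nil]
        rw [PySem.List.pyGetD_neg_ofNat _ 1 "" (by omega) (by simp)]
        simp [gInt, h0, show n ≤ 1 by omega]
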